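-- pv_equiv track=rewrite | github.com/pktangyue/LeetCode | python/1477_FindTwoNonOverlappingSubArraysEachWithTargetSum.py | minSumOfLengths
-- ===== SOURCE A (Python) =====
-- import math
-- from typing import List
--
-- def minSumOfLengths(arr: List[int], target: int) -> int:
--     ret = math.inf
--     # dp[i] 表示截止到 i ，子数组和为 target 最小长度
--     dp = [math.inf] * len(arr)
--     t = 0
--     i = j = 0
--     # 滑动窗口，累计子数组和
--     while j < len(arr):
--         t += arr[j]
--         while t > target:
--             t -= arr[i]
--             i += 1
--
--         # j-1 的最小长度在 j 肯定也满足
--         dp[j] = dp[j - 1] if j > 0 else math.inf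
--         if t == target:
--             # 出现满足条件的情况，v 为子数组长度
--             v = j - i + 1
--             dp[j] = min(dp[j], v)
--             # v + math.inf 仍为 math.inf
--             ret = min(ret, v + (dp[i - 1] if i > 0 else math.inf))
--
--         j += 1
--
--     return ret if not math.isinf(ret) else -1
-- ===== SOURCE B (Python) =====
-- from typing import List
--
-- def minSumOfLengths(arr: List[int], target: int) -> int:
--     # Exhaustive search: enumerate every target-sum window via prefix sums,
--     # then scan all ordered pairs of disjoint windows for the minimal total length.
--     n = len(arr)
--     pre = [0]
--     for x in arr:
--         pre.append(pre[-1] + x)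
--     wins = []
--     for i in range(n):
--         for j in range(i, n):
--             if pre[j + 1] - pre[i] == target:
--                 wins.append((i, j))
--     best = None
--     for (i1, j1) in wins:
--         for (i2, j2) in wins:
--             if j1 < i2:
--                 L = (j1 - i1 + 1) + (j2 - i2 + 1)
--                 if best is None or L < best:
--                     best = L
--     return best if best is not None else -1
-- ===== Notes on version B (the rewrite author's own statement) =====
-- stated objective: alternative
-- what changed: B abandons A's fused single-pass sliding window with a dp array of prefix-minimum lengths and instead enumerates every target-sum window explicitly via a precomputed prefix-sum table, then scans all ordered pairs of disjoint windows for the minimal total length.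
-- outside the precondition, e.g. on minSumOfLengths([2], 0): A returns 0, B returns -1; on minSumOfLengths([3, 0, 3], 3): A returns 3, B returns 2; on minSumOfLengths([5, -3, 1, 3], 3): A returns -1, B returns 4
import Mathlib
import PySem

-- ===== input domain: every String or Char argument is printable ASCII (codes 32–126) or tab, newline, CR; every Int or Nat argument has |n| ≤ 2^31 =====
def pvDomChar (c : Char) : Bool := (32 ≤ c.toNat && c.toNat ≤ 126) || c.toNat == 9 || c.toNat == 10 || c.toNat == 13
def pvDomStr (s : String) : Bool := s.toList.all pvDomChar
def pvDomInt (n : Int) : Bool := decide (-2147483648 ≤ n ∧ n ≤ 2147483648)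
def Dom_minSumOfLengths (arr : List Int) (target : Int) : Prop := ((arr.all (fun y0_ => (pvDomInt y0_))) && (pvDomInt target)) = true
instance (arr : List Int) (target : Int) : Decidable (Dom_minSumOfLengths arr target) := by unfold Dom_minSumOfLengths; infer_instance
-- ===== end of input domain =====

-- B replaces A's fused sliding-window + dp pass by explicit enumeration of all target-sum
-- windows (via a prefix-sum table) followed by a scan over ordered pairs of disjoint windows;
-- genuinely different algorithm, no speed claim.

-- ===== PORT A =====
-- math.inf is modelled by `none : Option Int` (it only ever appears as a sentinel that
-- every finite int undercuts); `pyInfMinA` is Python's `min` on such values.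
def pyInfMinA (a : Option Int) (b : Option Int) : Option Int :=
  match a, b with
  | none, b => b
  | some x, none => some x
  | some x, some y => some (min x y)

-- the inner `while t > target` loop; the fall-through at i = len(arr) is where
-- Python raises IndexError (reachable only outside Pre_).
def pyShrinkA (arr : List Int) (target : Int) (t : Int) (i : Nat) : Int × Nat :=
  if target < t then
    if h : i < arr.length then pyShrinkA arr target (t - arr[i]) (i + 1)
    else (t, i)
  else (t, i)
termination_by arr.length - i

-- one iteration of the outer `while j < len(arr)` loop; state (t, i, dp, ret)
def stepA (arr : List Int) (target : Int)
    (st : Int × Nat × List (Option Int) × Option Int) (j : Nat) :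
    Int × Nat × List (Option Int) × Option Int :=
  match st with
  | (t, i, dp, ret) =>
    let t := t + arr.getD j 0
    let p := pyShrinkA arr target t i
    let t := p.1
    let i := p.2
    let dp := dp.set j (if 0 < j then dp.getD (j - 1) none else none)
    if t = target then
      let v : Int := (j : Int) - (i : Int) + 1
      let dp := dp.set j (pyInfMinA (dp.getD j none) (some v))
      let ret := pyInfMinA ret ((if 0 < i then dp.getD (i - 1) none else none).map (fun w => v + w))
      (t, i, dp, ret)
    else (t, i, dp, ret)

def minSumOfLengths (arr : List Int) (target : Int) : Int :=
  let fin := (List.range arr.length).foldl (stepA arr target)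
    (0, 0, List.replicate arr.length (none : Option Int), (none : Option Int))
  match fin.2.2.2 with
  | some r => r
  | none => -1

-- ===== PORT B =====
-- `pre.append(pre[-1] + x)`; pre starts as [0] and only grows, so pre[-1] is `getLastD 0`
def preStep (acc : List Int) (x : Int) : List Int := acc ++ [acc.getLastD 0 + x]

def preB (arr : List Int) : List Int := arr.foldl preStep [0]

-- the double loop `for i in range(n): for j in range(i, n): if …: wins.append((i, j))`;
-- pre[j+1] / pre[i] are in range, so the getD default is never used
def winsB (arr : List Int) (target : Int) : List (Nat × Nat) :=
  let pre := preB arr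
  (List.range arr.length).foldl (fun ws i =>
    (List.range' i (arr.length - i)).foldl (fun ws j =>
      if pre.getD (j + 1) 0 - pre.getD i 0 = target then ws ++ [(i, j)] else ws) ws) []

-- `if best is None or L < best: best = L`
def updMin (best : Option Int) (L : Int) : Option Int :=
  match best with
  | none => some L
  | some b => if L < b then some L else some b

def minSumOfLengths_alt (arr : List Int) (target : Int) : Int :=
  let wins := winsB arr target
  let best := wins.foldl (fun best w1 =>
    wins.foldl (fun best w2 =>
      if w1.2 < w2.1 then
        updMin best (((w1.2 : Int) - (w1.1 : Int) + 1) + ((w2.2 : Int) - (w2.1 : Int) + 1))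
      else best) best) (none : Option Int)
  match best with
  | some b => b
  | none => -1

-- ===== PRECONDITION & SPEC =====
-- prefix sum of the first k elements (used by the precondition and the proofs)
def pfx (arr : List Int) (k : Nat) : Int := (arr.take k).sum

-- some ordered pair of disjoint target-sum windows exists (a closed-form property of the
-- input, quantified over index bounds; it does not run either algorithm)
def HasPair (arr : List Int) (target : Int) : Prop :=
  ∃ b2 < arr.length, ∃ a2 ≤ b2, ∃ b1 < a2, ∃ a1 ≤ b1,
    pfx arr (b1 + 1) - pfx arr a1 = target ∧ pfx arr (b2 + 1) - pfx arr a2 = target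

-- Pre_ admits the problem's natural domain (elements ≥ 1, target ≥ 1, the stated LeetCode
-- constraints) and additionally every input with target ≥ 1 on which no disjoint pair of
-- target windows exists at all (there both programs return -1). Excluded: negative targets
-- (A raises IndexError on most nonempty inputs), target = 0 (A pairs two empty windows and
-- returns 0), and inputs with elements ≤ 0 on which a disjoint pair exists (there A's
-- sliding-window pairing returns accidental values — see the cited examples).
def Pre_minSumOfLengths (arr : List Int) (target : Int) : Prop :=
  arr = [] ∨ (1 ≤ target ∧ ((∀ x ∈ arr, 1 ≤ x) ∨ ¬ HasPair arr target))
instance (arr : List Int) (target : Int) : Decidable (Pre_minSumOfLengths arr target) := by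
  unfold Pre_minSumOfLengths HasPair; infer_instance

def pvWitness_minSumOfLengths : List Int × Int := ([3, 2, 2, 4, 3], 3)

def Spec_minSumOfLengths (arr : List Int) (target : Int) (out : Int) : Prop :=
  out = minSumOfLengths_alt arr target
instance (arr : List Int) (target : Int) (out : Int) :
    Decidable (Spec_minSumOfLengths arr target out) := by
  unfold Spec_minSumOfLengths; infer_instance

-- ===== CLAIM (what is proved, stated in full; the proofs are below) =====
def Claim_equal_minSumOfLengths : Prop := ∀ (arr : List Int) (target : Int),
  Dom_minSumOfLengths arr target → Pre_minSumOfLengths arr target →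
  Spec_minSumOfLengths arr target (minSumOfLengths arr target)

-- ===== LEMMAS AND PROOFS =====

-- (a, b) is a target-sum window
def IsWin (arr : List Int) (target : Int) (a b : Nat) : Prop :=
  a ≤ b ∧ b < arr.length ∧ pfx arr (b + 1) - pfx arr a = target

-- v is the length of some target window ending strictly below c
def WinLen (arr : List Int) (target : Int) (c : Nat) (v : Int) : Prop :=
  ∃ a b, IsWin arr target a b ∧ b < c ∧ v = (b : Int) - (a : Int) + 1

-- v is the total length of an ordered pair of disjoint target windows, second ending below c
def PairT (arr : List Int) (target : Int) (c : Nat) (v : Int) : Prop :=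
  ∃ a1 b1 a2 b2, IsWin arr target a1 b1 ∧ IsWin arr target a2 b2 ∧ b1 < a2 ∧ b2 < c ∧
    v = ((b1 : Int) - (a1 : Int) + 1) + ((b2 : Int) - (a2 : Int) + 1)

-- o is the minimum of the set P (none iff P is empty)
def IsMinOpt (P : Int → Prop) (o : Option Int) : Prop :=
  (∀ v, P v → ∃ m, o = some m ∧ m ≤ v) ∧ (∀ m, o = some m → P m)

lemma IsMinOpt_unique {P : Int → Prop} {o o' : Option Int}
    (h : IsMinOpt P o) (h' : IsMinOpt P o') : o = o' := by
  cases o with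
  | none =>
    cases o' with
    | none => rfl
    | some m' =>
      obtain ⟨m, hm, _⟩ := h.1 m' (h'.2 m' rfl)
      exact absurd hm (by simp)
  | some m =>
    obtain ⟨m', hm', _⟩ := h'.1 m (h.2 m rfl)
    obtain ⟨m2, hm2, hle2⟩ := h.1 m' (h'.2 m' hm')
    rw [hm']
    simp only [Option.some.injEq] at hm2 ⊢
    omega

lemma IsMinOpt_congr {P Q : Int → Prop} {o : Option Int}
    (hpq : ∀ v, P v ↔ Q v) (h : IsMinOpt P o) : IsMinOpt Q o := by
  constructor
  · intro v hv
    exact h.1 v ((hpq v).mpr hv)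
  · intro m hm
    exact (hpq m).mp (h.2 m hm)

lemma IsMinOpt_empty {P : Int → Prop} (h : ∀ v, ¬ P v) : IsMinOpt P none := by
  exact ⟨fun v hv => absurd hv (h v), fun m hm => by simp at hm⟩

lemma IsMinOpt_updMin {P : Int → Prop} {o : Option Int} (L : Int)
    (h : IsMinOpt P o) : IsMinOpt (fun v => P v ∨ v = L) (updMin o L) := by
  cases o with
  | none =>
    refine ⟨fun v hv => ?_, fun m hm => ?_⟩
    · rcases hv with hv | hv
      · obtain ⟨m, hm, _⟩ := h.1 v hv
        exact absurd hm (by simp)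
      · exact ⟨L, rfl, le_of_eq hv.symm⟩
    · simp only [updMin, Option.some.injEq] at hm
      exact Or.inr hm.symm
  | some b =>
    refine ⟨fun v hv => ?_, fun m hm => ?_⟩
    · rcases hv with hv | hv
      · obtain ⟨m, hm, hle⟩ := h.1 v hv
        simp only [Option.some.injEq] at hm
        subst hm
        simp only [updMin]
        split_ifs with hb
        · exact ⟨L, rfl, by omega⟩
        · exact ⟨b, rfl, hle⟩
      · subst hv
        simp only [updMin]
        split_ifs with hb
        · exact ⟨v, rfl, le_rfl⟩
        · exact ⟨b, rfl, by omega⟩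
    · simp only [updMin] at hm
      split_ifs at hm with hb <;> simp only [Option.some.injEq] at hm
      · exact Or.inr hm.symm
      · exact Or.inl (h.2 m (by rw [hm]))

lemma IsMinOpt_pyInfMinA_some {P : Int → Prop} {o : Option Int} (L : Int)
    (h : IsMinOpt P o) : IsMinOpt (fun v => P v ∨ v = L) (pyInfMinA o (some L)) := by
  have hsame : pyInfMinA o (some L) = updMin o L := by
    cases o with
    | none => rfl
    | some b =>
      simp only [pyInfMinA, updMin, min_def]
      split_ifs <;> first | rfl | (congr 1; omega)
  rw [hsame]
  exact IsMinOpt_updMin L h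

lemma IsMinOpt_pyInfMinA_map {P Q : Int → Prop} {ret o : Option Int} (c : Int)
    (h : IsMinOpt P ret) (h' : IsMinOpt Q o) :
    IsMinOpt (fun v => P v ∨ ∃ w, Q w ∧ v = c + w) (pyInfMinA ret (o.map (fun w => c + w))) := by
  cases o with
  | none =>
    have hempty : ∀ v, (P v ∨ ∃ w, Q w ∧ v = c + w) ↔ P v := by
      intro v
      constructor
      · rintro (hv | ⟨w, hw, _⟩)
        · exact hv
        · obtain ⟨m, hm, _⟩ := h'.1 w hw
          exact absurd hm (by simp)
      · exact Or.inl
    simp only [Option.map_none]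
    have hret : pyInfMinA ret none = ret := by cases ret <;> rfl
    rw [hret]
    exact IsMinOpt_congr (fun v => (hempty v).symm) h
  | some m =>
    simp only [Option.map_some]
    have hQm := h'.2 m rfl
    have hbase := IsMinOpt_pyInfMinA_some (c + m) h
    refine ⟨fun v hv => ?_, fun v hv => ?_⟩
    · rcases hv with hv | ⟨w, hw, hvw⟩
      · exact hbase.1 v (Or.inl hv)
      · obtain ⟨m2, hm2, hle⟩ := h'.1 w hw
        simp only [Option.some.injEq] at hm2
        subst hm2
        obtain ⟨r, hr, hrle⟩ := hbase.1 (c + m) (Or.inr rfl)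
        exact ⟨r, hr, by omega⟩
    · rcases hbase.2 v hv with hp | hp
      · exact Or.inl hp
      · exact Or.inr ⟨m, hQm, hp⟩

lemma pfx_succ (arr : List Int) (k : Nat) (h : k < arr.length) :
    pfx arr (k + 1) = pfx arr k + arr[k] := by
  unfold pfx
  rw [List.take_add_one, List.sum_append]
  simp [List.getElem?_eq_getElem h]

-- with all elements ≥ 1, prefix sums are strictly increasing
lemma pfx_lt_pfx (arr : List Int) (hpos : ∀ x ∈ arr, 1 ≤ x) {a b : Nat}
    (hab : a < b) (hb : b ≤ arr.length) : pfx arr a < pfx arr b := by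
  induction b with
  | zero => omega
  | succ b ihb =>
    have hb' : b < arr.length := by omega
    have hstep : pfx arr b + 1 ≤ pfx arr (b + 1) := by
      rw [pfx_succ arr b hb']
      have := hpos arr[b] (List.getElem_mem hb')
      omega
    rcases Nat.lt_or_ge a b with h | h
    · have := ihb h (by omega)
      omega
    · have : a = b := by omega
      subst this
      omega

lemma pfx_le_pfx (arr : List Int) (hpos : ∀ x ∈ arr, 1 ≤ x) {a b : Nat}
    (hab : a ≤ b) (hb : b ≤ arr.length) : pfx arr a ≤ pfx arr b := by
  rcases Nat.eq_or_lt_of_le hab with h | h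
  · subst h
    exact le_rfl
  · exact le_of_lt (pfx_lt_pfx arr hpos h hb)

-- the prefix list built by Source B is the table of prefix sums
lemma preB_eq (arr : List Int) :
    preB arr = (List.range (arr.length + 1)).map (pfx arr) := by
  induction arr using List.reverseRecOn with
  | nil => rfl
  | append_singleton xs x ih =>
    unfold preB at ih ⊢
    rw [List.foldl_append, ih, List.foldl_cons, List.foldl_nil]
    unfold preStep
    have hlast : ((List.range (xs.length + 1)).map (pfx xs)).getLastD 0 = pfx xs xs.length := by
      rw [List.range_succ, List.map_append]
      simp
    rw [hlast]
    have hlen : (xs ++ [x]).length = xs.length + 1 := by simp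
    rw [hlen, List.range_succ (n := xs.length + 1), List.map_append]
    congr 1
    · apply List.map_congr_left
      intro k hk
      rw [List.mem_range] at hk
      unfold pfx
      rw [List.take_append_of_le_length (by omega)]
    · simp only [List.map_cons, List.map_nil, List.cons.injEq, and_true]
      unfold pfx
      rw [List.take_of_length_le (by simp), List.take_of_length_le (by omega), List.sum_append]
      simp

lemma preB_getD (arr : List Int) (k : Nat) (hk : k ≤ arr.length) :
    (preB arr).getD k 0 = pfx arr k := by
  rw [preB_eq, List.getD_eq_getElem?_getD, List.getElem?_map, List.getElem?_range (by omega)]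
  rfl

-- generic: membership in an append-if fold
lemma mem_foldl_append_if {α β : Type} (l : List α) (p : α → Prop) [DecidablePred p]
    (f : α → β) (ws0 : List β) (e : β) :
    e ∈ l.foldl (fun ws x => if p x then ws ++ [f x] else ws) ws0 ↔
      e ∈ ws0 ∨ ∃ x ∈ l, p x ∧ e = f x := by
  induction l generalizing ws0 with
  | nil => simp
  | cons hd tl ih =>
    rw [List.foldl_cons, ih]
    by_cases hp : p hd
    · simp only [if_pos hp, List.mem_append, List.mem_singleton]
      constructor
      · rintro ((h | h) | h)
        · exact Or.inl h
        · exact Or.inr ⟨hd, by simp, hp, h⟩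
        · obtain ⟨x, hx, hpx, hex⟩ := h
          exact Or.inr ⟨x, by simp [hx], hpx, hex⟩
      · rintro (h | ⟨x, hx, hpx, hex⟩)
        · exact Or.inl (Or.inl h)
        · rcases List.mem_cons.mp hx with rfl | hx
          · exact Or.inl (Or.inr hex)
          · exact Or.inr ⟨x, hx, hpx, hex⟩
    · simp only [if_neg hp]
      constructor
      · rintro (h | ⟨x, hx, hpx, hex⟩)
        · exact Or.inl h
        · exact Or.inr ⟨x, by simp [hx], hpx, hex⟩
      · rintro (h | ⟨x, hx, hpx, hex⟩)
        · exact Or.inl h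
        · rcases List.mem_cons.mp hx with rfl | hx
          · exact absurd hpx hp
          · exact Or.inr ⟨x, hx, hpx, hex⟩

-- generic: membership through an outer fold whose body appends
lemma mem_foldl_of_body {α β : Type} (l : List α) (g : List β → α → List β)
    (Q : α → β → Prop) (hbody : ∀ ws x e, e ∈ g ws x ↔ e ∈ ws ∨ Q x e) (ws0 : List β) (e : β) :
    e ∈ l.foldl g ws0 ↔ e ∈ ws0 ∨ ∃ x ∈ l, Q x e := by
  induction l generalizing ws0 with
  | nil => simp
  | cons hd tl ih =>
    rw [List.foldl_cons, ih]
    rw [hbody ws0 hd e]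
    constructor
    · rintro ((h | h) | ⟨x, hx, hq⟩)
      · exact Or.inl h
      · exact Or.inr ⟨hd, by simp, h⟩
      · exact Or.inr ⟨x, by simp [hx], hq⟩
    · rintro (h | ⟨x, hx, hq⟩)
      · exact Or.inl (Or.inl h)
      · rcases List.mem_cons.mp hx with rfl | hx
        · exact Or.inl (Or.inr hq)
        · exact Or.inr ⟨x, hx, hq⟩

lemma winsB_mem (arr : List Int) (target : Int) (a b : Nat) :
    (a, b) ∈ winsB arr target ↔ IsWin arr target a b := by
  show (a, b) ∈ (List.range arr.length).foldl (fun ws i =>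
      (List.range' i (arr.length - i)).foldl (fun ws j =>
        if (preB arr).getD (j + 1) 0 - (preB arr).getD i 0 = target then ws ++ [(i, j)]
        else ws) ws) [] ↔ IsWin arr target a b
  rw [mem_foldl_of_body (List.range arr.length) _
    (fun i e => ∃ j ∈ List.range' i (arr.length - i),
      ((preB arr).getD (j + 1) 0 - (preB arr).getD i 0 = target) ∧ e = (i, j))
    (fun ws x e => mem_foldl_append_if (List.range' x (arr.length - x))
      (fun j => (preB arr).getD (j + 1) 0 - (preB arr).getD x 0 = target)
      (fun j => (x, j)) ws e) [] (a, b)]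
  constructor
  · rintro (h | ⟨x, hx, j, hj, hc, he⟩)
    · simp at h
    · rw [List.mem_range] at hx
      rw [List.mem_range'_1] at hj
      simp only [Prod.mk.injEq] at he
      obtain ⟨rfl, rfl⟩ := he
      refine ⟨hj.1, by omega, ?_⟩
      rwa [preB_getD arr (b + 1) (by omega), preB_getD arr a (by omega)] at hc
  · rintro ⟨hab, hbn, hsum⟩
    refine Or.inr ⟨a, ?_, b, ?_, ?_, rfl⟩
    · rw [List.mem_range]
      omega
    · rw [List.mem_range'_1]
      omega
    · rw [preB_getD arr (b + 1) (by omega), preB_getD arr a (by omega)]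
      exact hsum

-- generic: a fold whose body extends the represented candidate set accumulates a minimum
lemma foldl_isMin_of_body {α : Type} (l : List α) (body : Option Int → α → Option Int)
    (R : α → Int → Prop)
    (hbody : ∀ (P : Int → Prop) b x, IsMinOpt P b → IsMinOpt (fun v => P v ∨ R x v) (body b x)) :
    ∀ (P0 : Int → Prop) (b0 : Option Int), IsMinOpt P0 b0 →
      IsMinOpt (fun v => P0 v ∨ ∃ x ∈ l, R x v) (l.foldl body b0) := by
  induction l with
  | nil =>
    intro P0 b0 h0
    rw [List.foldl_nil]
    refine IsMinOpt_congr (fun v => ?_) h0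
    simp
  | cons hd tl ih =>
    intro P0 b0 h0
    rw [List.foldl_cons]
    have h1 := hbody P0 b0 hd h0
    have h2 := ih _ _ h1
    refine IsMinOpt_congr (fun v => ?_) h2
    constructor
    · rintro ((h | h) | ⟨x, hx, hr⟩)
      · exact Or.inl h
      · exact Or.inr ⟨hd, by simp, h⟩
      · exact Or.inr ⟨x, by simp [hx], hr⟩
    · rintro (h | ⟨x, hx, hr⟩)
      · exact Or.inl (Or.inl h)
      · rcases List.mem_cons.mp hx with rfl | hx
        · exact Or.inl (Or.inr hr)
        · exact Or.inr ⟨x, hx, hr⟩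

-- the inner pair fold accumulates a minimum
lemma foldl_updMin_isMin {α : Type} (l : List α) (p : α → Prop) [DecidablePred p]
    (g : α → Int) {P : Int → Prop} {b0 : Option Int} (h : IsMinOpt P b0) :
    IsMinOpt (fun v => P v ∨ ∃ x ∈ l, p x ∧ v = g x)
      (l.foldl (fun best x => if p x then updMin best (g x) else best) b0) := by
  refine foldl_isMin_of_body l _ (fun x v => p x ∧ v = g x) ?_ P b0 h
  intro P' b x hb
  by_cases hp : p x
  · simp only [if_pos hp]
    refine IsMinOpt_congr (fun v => ?_) (IsMinOpt_updMin (g x) hb)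
    constructor
    · rintro (h | h)
      · exact Or.inl h
      · exact Or.inr ⟨hp, h⟩
    · rintro (h | ⟨_, h⟩)
      · exact Or.inl h
      · exact Or.inr h
  · simp only [if_neg hp]
    refine IsMinOpt_congr (fun v => ?_) hb
    constructor
    · exact Or.inl
    · rintro (h | ⟨hpx, _⟩)
      · exact h
      · exact absurd hpx hp

-- Source B's double pair loop computes the minimum total over disjoint window pairs
lemma bestB_isMin (arr : List Int) (target : Int) :
    IsMinOpt (PairT arr target arr.length)
      ((winsB arr target).foldl (fun best w1 =>
        (winsB arr target).foldl (fun best w2 =>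
          if w1.2 < w2.1 then
            updMin best (((w1.2 : Int) - (w1.1 : Int) + 1) + ((w2.2 : Int) - (w2.1 : Int) + 1))
          else best) best) (none : Option Int)) := by
  have hinner : ∀ (P : Int → Prop) (b : Option Int) (w1 : Nat × Nat), IsMinOpt P b →
      IsMinOpt (fun v => P v ∨ ∃ w2 ∈ winsB arr target, w1.2 < w2.1 ∧
          v = ((w1.2 : Int) - (w1.1 : Int) + 1) + ((w2.2 : Int) - (w2.1 : Int) + 1))
        ((winsB arr target).foldl (fun best w2 =>
          if w1.2 < w2.1 then
            updMin best (((w1.2 : Int) - (w1.1 : Int) + 1) + ((w2.2 : Int) - (w2.1 : Int) + 1))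
          else best) b) := by
    intro P b w1 hb
    exact foldl_updMin_isMin (winsB arr target) (fun w2 => w1.2 < w2.1) _ hb
  have houter := foldl_isMin_of_body (winsB arr target) _
    (fun w1 v => ∃ w2 ∈ winsB arr target, w1.2 < w2.1 ∧
      v = ((w1.2 : Int) - (w1.1 : Int) + 1) + ((w2.2 : Int) - (w2.1 : Int) + 1))
    hinner (fun _ => False) none (IsMinOpt_empty (fun v h => h))
  refine IsMinOpt_congr (fun v => ?_) houter
  constructor
  · rintro (h | ⟨w1, hw1, w2, hw2, hlt, hv⟩)
    · exact absurd h not_false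
    · obtain ⟨a1, b1⟩ := w1
      obtain ⟨a2, b2⟩ := w2
      rw [winsB_mem] at hw1 hw2
      exact ⟨a1, b1, a2, b2, hw1, hw2, hlt, hw2.2.1, hv⟩
  · rintro ⟨a1, b1, a2, b2, hw1, hw2, hlt, _, hv⟩
    exact Or.inr ⟨(a1, b1), (winsB_mem arr target a1 b1).mpr hw1,
      (a2, b2), (winsB_mem arr target a2 b2).mpr hw2, hlt, hv⟩

-- extended shrink specification: result, bounds, and minimality of the new window start
lemma shrinkA_spec (arr : List Int) (target : Int) (ht : 0 ≤ target) (m : Nat)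
    (hm : m ≤ arr.length) (i : Nat) (hi : i ≤ m) :
    (pyShrinkA arr target (pfx arr m - pfx arr i) i).1 =
      pfx arr m - pfx arr (pyShrinkA arr target (pfx arr m - pfx arr i) i).2 ∧
    i ≤ (pyShrinkA arr target (pfx arr m - pfx arr i) i).2 ∧
    (pyShrinkA arr target (pfx arr m - pfx arr i) i).2 ≤ m ∧
    (pyShrinkA arr target (pfx arr m - pfx arr i) i).1 ≤ target ∧
    (∀ k, i ≤ k → k < (pyShrinkA arr target (pfx arr m - pfx arr i) i).2 →
      target < pfx arr m - pfx arr k) := by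
  suffices H : ∀ n i, i ≤ m → m - i ≤ n →
      (pyShrinkA arr target (pfx arr m - pfx arr i) i).1 =
        pfx arr m - pfx arr (pyShrinkA arr target (pfx arr m - pfx arr i) i).2 ∧
      i ≤ (pyShrinkA arr target (pfx arr m - pfx arr i) i).2 ∧
      (pyShrinkA arr target (pfx arr m - pfx arr i) i).2 ≤ m ∧
      (pyShrinkA arr target (pfx arr m - pfx arr i) i).1 ≤ target ∧
      (∀ k, i ≤ k → k < (pyShrinkA arr target (pfx arr m - pfx arr i) i).2 →
        target < pfx arr m - pfx arr k) by
    exact H (m - i) i hi le_rfl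
  intro n
  induction n with
  | zero =>
    intro i hi hn
    have him : i = m := by omega
    subst him
    rw [pyShrinkA]
    have hng : ¬ target < pfx arr i - pfx arr i := by omega
    simp only [hng, if_false]
    refine ⟨by trivial, le_rfl, le_rfl, by omega, ?_⟩
    intro k hk1 hk2
    omega
  | succ n ih =>
    intro i hi hn
    rw [pyShrinkA]
    by_cases hlt : target < pfx arr m - pfx arr i
    · have him : i < m := by
        rcases Nat.lt_or_ge i m with h | h
        · exact h
        · exfalso
          have : i = m := le_antisymm hi h
          subst this
          omega
      have hia : i < arr.length := lt_of_lt_of_le him hm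
      simp only [hlt, if_true, dif_pos hia]
      have heq : pfx arr m - pfx arr i - arr[i] = pfx arr m - pfx arr (i + 1) := by
        rw [pfx_succ arr i hia]
        ring
      rw [heq]
      obtain ⟨c1, c2, c3, c4, c5⟩ := ih (i + 1) him (by omega)
      refine ⟨c1, le_trans (Nat.le_succ i) c2, c3, c4, ?_⟩
      intro k hk1 hk2
      rcases Nat.eq_or_lt_of_le hk1 with rfl | hk1'
      · exact hlt
      · exact c5 k hk1' hk2
    · simp only [hlt, if_false]
      refine ⟨by trivial, le_rfl, hi, by omega, ?_⟩
      intro k hk1 hk2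
      omega

lemma getD_set_ne (l : List (Option Int)) (m k : Nat) (x : Option Int) (h : k ≠ m) :
    (l.set m x).getD k none = l.getD k none := by
  simp [List.getD_eq_getElem?_getD, Ne.symm h]

lemma getD_set_self (l : List (Option Int)) (m : Nat) (x : Option Int) (h : m < l.length) :
    (l.set m x).getD m none = x := by
  simp [List.getD_eq_getElem?_getD, h]

-- A's loop invariant after j iterations
def InvA (arr : List Int) (target : Int) (j : Nat)
    (st : Int × Nat × List (Option Int) × Option Int) : Prop :=
  match st with
  | (t, i, dp, ret) =>
    t = pfx arr j - pfx arr i ∧ i ≤ j ∧ t ≤ target ∧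
    (∀ k, k < i → target < pfx arr j - pfx arr k) ∧
    dp.length = arr.length ∧
    (∀ k, k < j → IsMinOpt (WinLen arr target (k + 1)) (dp.getD k none)) ∧
    IsMinOpt (PairT arr target j) ret

def stA (arr : List Int) (target : Int) (j : Nat) : Int × Nat × List (Option Int) × Option Int :=
  (List.range j).foldl (stepA arr target)
    (0, 0, List.replicate arr.length (none : Option Int), (none : Option Int))

lemma inv_step (arr : List Int) (target : Int) (ht : 1 ≤ target)
    (hpos : ∀ x ∈ arr, 1 ≤ x) (j : Nat) (hj : j < arr.length)
    (st : Int × Nat × List (Option Int) × Option Int) (hInv : InvA arr target j st) :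
    InvA arr target (j + 1) (stepA arr target st j) := by
  obtain ⟨t, i, dp, ret⟩ := st
  obtain ⟨hTval, hIle, hTle, hMin, hLen, hDp, hRet⟩ := hInv
  subst hTval
  have hgd : arr.getD j 0 = arr[j] := by
    rw [List.getD_eq_getElem?_getD, List.getElem?_eq_getElem hj]
    rfl
  have ht1 : pfx arr j - pfx arr i + arr.getD j 0 = pfx arr (j + 1) - pfx arr i := by
    rw [hgd, pfx_succ arr j hj]
    ring
  have h0 : (0 : Int) ≤ target := by omega
  obtain ⟨hPt, hPi, hPle, hPtar, hPmin⟩ :=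
    shrinkA_spec arr target h0 (j + 1) (by omega) i (by omega)
  set P := pyShrinkA arr target (pfx arr (j + 1) - pfx arr i) i with hP
  simp only [stepA, ht1, ← hP]
  have hMin' : ∀ k, k < P.2 → target < pfx arr (j + 1) - pfx arr k := by
    intro k hk
    rcases Nat.lt_or_ge k i with hki | hki
    · have h1 := hMin k hki
      have h2 : pfx arr j ≤ pfx arr (j + 1) := pfx_le_pfx arr hpos (by omega) (by omega)
      omega
    · exact hPmin k hki hk
  have hPrev : IsMinOpt (WinLen arr target j)
      (if 0 < j then dp.getD (j - 1) none else none) := by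
    by_cases hj0 : 0 < j
    · rw [if_pos hj0]
      have := hDp (j - 1) (by omega)
      rwa [Nat.sub_add_cancel (by omega)] at this
    · rw [if_neg hj0]
      refine IsMinOpt_empty ?_
      rintro v ⟨a, b, hw, hb, hv⟩
      omega
  set prev := (if 0 < j then dp.getD (j - 1) none else none) with hprev
  have hset1j : (dp.set j prev).getD j none = prev := getD_set_self dp j prev (by omega)
  by_cases hHit : P.1 = target
  · simp only [if_pos hHit, hset1j]
    have hij : P.2 ≤ j := by
      by_contra hgt
      have : P.2 = j + 1 := by omega
      rw [this] at hPt
      have : P.1 = 0 := by omega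
      omega
    have hwin : IsWin arr target P.2 j := ⟨hij, hj, by omega⟩
    have huniq : ∀ a, IsWin arr target a j → a = P.2 := by
      rintro a ⟨haj, _, hsum⟩
      rcases Nat.lt_trichotomy a P.2 with hlt | heq | hgt
      · have := hMin' a hlt
        omega
      · exact heq
      · exfalso
        have hstr : pfx arr P.2 < pfx arr a := pfx_lt_pfx arr hpos hgt (by omega)
        omega
    have hWchar : ∀ v, WinLen arr target (j + 1) v ↔
        WinLen arr target j v ∨ v = (j : Int) - (P.2 : Int) + 1 := by
      intro v
      constructor
      · rintro ⟨a, b, hw, hb, hv⟩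
        rcases Nat.lt_or_ge b j with hbj | hbj
        · exact Or.inl ⟨a, b, hw, hbj, hv⟩
        · have hbj' : b = j := by omega
          subst hbj'
          have := huniq a hw
          subst this
          exact Or.inr hv
      · rintro (⟨a, b, hw, hb, hv⟩ | hv)
        · exact ⟨a, b, hw, by omega, hv⟩
        · exact ⟨P.2, j, hwin, by omega, hv⟩
    refine ⟨hPt, by omega, hPtar, hMin', by simp [hLen], ?_, ?_⟩
    · -- dp characterization after the two sets
      intro k hk
      rcases Nat.lt_or_ge k j with hkj | hkj
      · rw [getD_set_ne _ _ _ _ (by omega), getD_set_ne _ _ _ _ (by omega)]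
        exact hDp k hkj
      · have hkj' : k = j := by omega
        subst hkj'
        rw [getD_set_self _ _ _ (by simp [hLen]; omega)]
        exact IsMinOpt_congr (fun v => (hWchar v).symm)
          (IsMinOpt_pyInfMinA_some _ hPrev)
    · -- ret characterization
      have hO : IsMinOpt (WinLen arr target P.2)
          (if 0 < P.2 then
            ((dp.set j prev).set j (pyInfMinA prev (some ((j : Int) - (P.2 : Int) + 1)))).getD
              (P.2 - 1) none
          else none) := by
        by_cases hP2 : 0 < P.2
        · rw [if_pos hP2, getD_set_ne _ _ _ _ (by omega), getD_set_ne _ _ _ _ (by omega)]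
          have := hDp (P.2 - 1) (by omega)
          rwa [Nat.sub_add_cancel (by omega)] at this
        · rw [if_neg hP2]
          refine IsMinOpt_empty ?_
          rintro v ⟨a, b, hw, hb, hv⟩
          omega
      have hPchar : ∀ v, PairT arr target (j + 1) v ↔
          PairT arr target j v ∨
            ∃ w, WinLen arr target P.2 w ∧ v = ((j : Int) - (P.2 : Int) + 1) + w := by
        intro v
        constructor
        · rintro ⟨a1, b1, a2, b2, h1, h2, hlt, hb2, hv⟩
          rcases Nat.lt_or_ge b2 j with hbj | hbj
          · exact Or.inl ⟨a1, b1, a2, b2, h1, h2, hlt, hbj, hv⟩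
          · have hbj' : b2 = j := by omega
            subst hbj'
            have := huniq a2 h2
            subst this
            exact Or.inr ⟨(b1 : Int) - (a1 : Int) + 1, ⟨a1, b1, h1, hlt, rfl⟩, by omega⟩
        · rintro (⟨a1, b1, a2, b2, h1, h2, hlt, hb2, hv⟩ | ⟨w, ⟨a, b, hw, hb, hwv⟩, hv⟩)
          · exact ⟨a1, b1, a2, b2, h1, h2, hlt, by omega, hv⟩
          · exact ⟨a, b, P.2, j, hw, hwin, hb, by omega, by omega⟩
      exact IsMinOpt_congr (fun v => (hPchar v).symm)
        (IsMinOpt_pyInfMinA_map _ hRet hO)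
  · simp only [if_neg hHit]
    have hnowin : ∀ a, ¬ IsWin arr target a j := by
      rintro a ⟨haj, _, hsum⟩
      rcases Nat.lt_trichotomy a P.2 with hlt | heq | hgt
      · have := hMin' a hlt
        omega
      · subst heq
        omega
      · have hstr : pfx arr P.2 < pfx arr a := pfx_lt_pfx arr hpos hgt (by omega)
        omega
    refine ⟨hPt, by omega, hPtar, hMin', by simp [hLen], ?_, ?_⟩
    · intro k hk
      rcases Nat.lt_or_ge k j with hkj | hkj
      · rw [getD_set_ne _ _ _ _ (by omega)]
        exact hDp k hkj
      · have hkj' : k = j := by omega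
        subst hkj'
        rw [hset1j]
        refine IsMinOpt_congr (fun v => ?_) hPrev
        constructor
        · rintro ⟨a, b, hw, hb, hv⟩
          exact ⟨a, b, hw, by omega, hv⟩
        · rintro ⟨a, b, hw, hb, hv⟩
          rcases Nat.lt_or_ge b k with hbj | hbj
          · exact ⟨a, b, hw, hbj, hv⟩
          · have hbe : b = k := by omega
            subst hbe
            exact absurd hw (hnowin a)
    · refine IsMinOpt_congr (fun v => ?_) hRet
      constructor
      · rintro ⟨a1, b1, a2, b2, h1, h2, hlt, hb2, hv⟩
        exact ⟨a1, b1, a2, b2, h1, h2, hlt, by omega, hv⟩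
      · rintro ⟨a1, b1, a2, b2, h1, h2, hlt, hb2, hv⟩
        rcases Nat.lt_or_ge b2 j with hbj | hbj
        · exact ⟨a1, b1, a2, b2, h1, h2, hlt, hbj, hv⟩
        · have : b2 = j := by omega
          subst this
          exact absurd h2 (hnowin a2)

lemma inv_all (arr : List Int) (target : Int) (ht : 1 ≤ target)
    (hpos : ∀ x ∈ arr, 1 ≤ x) :
    ∀ j, j ≤ arr.length → InvA arr target j (stA arr target j) := by
  intro j
  induction j with
  | zero =>
    intro _
    unfold stA
    simp only [List.range_zero, List.foldl_nil]
    refine ⟨by simp [pfx], le_rfl, by omega, ?_, by simp, ?_, ?_⟩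
    · intro k hk
      omega
    · intro k hk
      omega
    · refine IsMinOpt_empty ?_
      rintro v ⟨a1, b1, a2, b2, _, _, _, hb2, _⟩
      omega
  | succ j ihj =>
    intro hle
    have hj : j < arr.length := by omega
    have hstep := inv_step arr target ht hpos j hj _ (ihj (by omega))
    have hA : stA arr target (j + 1) = stepA arr target (stA arr target j) j := by
      unfold stA
      rw [List.range_succ, List.foldl_append, List.foldl_cons, List.foldl_nil]
    rw [hA]
    exact hstep

-- no-pair region: both programs return -1
lemma PairT_hasPair (arr : List Int) (target : Int) (v : Int)
    (h : PairT arr target arr.length v) : HasPair arr target := by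
  obtain ⟨a1, b1, a2, b2, ⟨h1a, h1b, h1s⟩, ⟨h2a, h2b, h2s⟩, hlt, hb2, _⟩ := h
  exact ⟨b2, h2b, a2, h2a, b1, hlt, a1, h1a, h1s, h2s⟩

-- weak (soundness-only) invariant for A, valid for arbitrary elements when target ≥ 1
def InvS (arr : List Int) (target : Int) (j : Nat)
    (st : Int × Nat × List (Option Int) × Option Int) : Prop :=
  match st with
  | (t, i, dp, ret) =>
    t = pfx arr j - pfx arr i ∧ i ≤ j ∧ t ≤ target ∧
    dp.length = arr.length ∧
    (∀ k v, dp.getD k none = some v → WinLen arr target (k + 1) v) ∧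
    (∀ v, ret = some v → ∃ w, PairT arr target j w)

lemma pyInfMinA_some_cases (x y : Option Int) (m : Int)
    (h : pyInfMinA x y = some m) :
    (∃ a, x = some a) ∨ (∃ b, y = some b) := by
  cases x <;> cases y <;> simp [pyInfMinA] at h ⊢

lemma pyInfMinA_some_some_val (x : Option Int) (v m : Int)
    (h : pyInfMinA x (some v) = some m) :
    m = v ∨ ∃ a, x = some a ∧ m = a := by
  cases x with
  | none =>
    simp [pyInfMinA] at h
    exact Or.inl h.symm
  | some a =>
    simp only [pyInfMinA, Option.some.injEq] at h
    rcases min_cases a v with ⟨he, _⟩ | ⟨he, _⟩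
    · exact Or.inr ⟨a, rfl, by omega⟩
    · exact Or.inl (by omega)

lemma invS_step (arr : List Int) (target : Int) (ht : 1 ≤ target) (j : Nat)
    (hj : j < arr.length) (st : Int × Nat × List (Option Int) × Option Int)
    (hInv : InvS arr target j st) : InvS arr target (j + 1) (stepA arr target st j) := by
  obtain ⟨t, i, dp, ret⟩ := st
  obtain ⟨hTval, hIle, hTle, hLen, hDp, hRet⟩ := hInv
  subst hTval
  have hgd : arr.getD j 0 = arr[j] := by
    rw [List.getD_eq_getElem?_getD, List.getElem?_eq_getElem hj]
    rfl
  have ht1 : pfx arr j - pfx arr i + arr.getD j 0 = pfx arr (j + 1) - pfx arr i := by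
    rw [hgd, pfx_succ arr j hj]
    ring
  have h0 : (0 : Int) ≤ target := by omega
  obtain ⟨hPt, hPi, hPle, hPtar, _⟩ :=
    shrinkA_spec arr target h0 (j + 1) (by omega) i (by omega)
  set P := pyShrinkA arr target (pfx arr (j + 1) - pfx arr i) i with hP
  simp only [stepA, ht1, ← hP]
  have hPrevS : ∀ v, (if 0 < j then dp.getD (j - 1) none else none) = some v →
      WinLen arr target (j + 1) v := by
    intro v hv
    by_cases hj0 : 0 < j
    · rw [if_pos hj0] at hv
      obtain ⟨a, b, hw, hb, hveq⟩ := hDp (j - 1) v hv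
      exact ⟨a, b, hw, by omega, hveq⟩
    · rw [if_neg hj0] at hv
      exact absurd hv (by simp)
  set prev := (if 0 < j then dp.getD (j - 1) none else none) with hprev
  have hset1j : (dp.set j prev).getD j none = prev := getD_set_self dp j prev (by omega)
  by_cases hHit : P.1 = target
  · simp only [if_pos hHit, hset1j]
    have hij : P.2 ≤ j := by
      by_contra hgt
      have : P.2 = j + 1 := by omega
      rw [this] at hPt
      have : P.1 = 0 := by omega
      omega
    have hwin : IsWin arr target P.2 j := ⟨hij, hj, by omega⟩
    refine ⟨hPt, by omega, hPtar, by simp [hLen], ?_, ?_⟩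
    · intro k v hv
      rcases eq_or_ne j k with rfl | hne
      · rw [getD_set_self _ _ _ (by simp [hLen]; omega)] at hv
        rcases pyInfMinA_some_some_val prev _ v hv with hv' | ⟨a, ha, hv'⟩
        · subst hv'
          exact ⟨P.2, j, hwin, by omega, rfl⟩
        · subst hv'
          exact hPrevS _ ha
      · rw [getD_set_ne _ _ _ _ (Ne.symm hne), getD_set_ne _ _ _ _ (Ne.symm hne)] at hv
        obtain ⟨a, b, hw, hb, hveq⟩ := hDp k v hv
        exact ⟨a, b, hw, hb, hveq⟩
    · intro v hv
      rcases pyInfMinA_some_cases _ _ _ hv with ⟨a, ha⟩ | ⟨bv, hb⟩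
      · obtain ⟨w, hw⟩ := hRet a ha
        obtain ⟨a1, b1, a2, b2, h1, h2, hlt, hb2, hveq⟩ := hw
        exact ⟨w, a1, b1, a2, b2, h1, h2, hlt, by omega, hveq⟩
      · rw [Option.map_eq_some_iff] at hb
        obtain ⟨w, hwsrc, _⟩ := hb
        by_cases hP2 : 0 < P.2
        · rw [if_pos hP2, getD_set_ne _ _ _ _ (by omega), getD_set_ne _ _ _ _ (by omega)]
            at hwsrc
          obtain ⟨a, b, hw', hb', hveq⟩ := hDp (P.2 - 1) w hwsrc
          refine ⟨((b : Int) - a + 1) + (((j : Int) - P.2 + 1)),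
            a, b, P.2, j, hw', hwin, by omega, by omega, rfl⟩
        · rw [if_neg hP2] at hwsrc
          exact absurd hwsrc (by simp)
  · simp only [if_neg hHit]
    refine ⟨hPt, by omega, hPtar, by simp [hLen], ?_, ?_⟩
    · intro k v hv
      rcases eq_or_ne j k with rfl | hne
      · rw [hset1j] at hv
        exact hPrevS v hv
      · rw [getD_set_ne _ _ _ _ (Ne.symm hne)] at hv
        exact hDp k v hv
    · intro v hv
      obtain ⟨w, a1, b1, a2, b2, h1, h2, hlt, hb2, hveq⟩ := hRet v hv
      exact ⟨w, a1, b1, a2, b2, h1, h2, hlt, by omega, hveq⟩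

lemma invS_all (arr : List Int) (target : Int) (ht : 1 ≤ target) :
    ∀ j, j ≤ arr.length → InvS arr target j (stA arr target j) := by
  intro j
  induction j with
  | zero =>
    intro _
    unfold stA
    simp only [List.range_zero, List.foldl_nil]
    refine ⟨by simp [pfx], le_rfl, by omega, by simp, ?_, ?_⟩
    · intro k v hv
      rw [List.getD_eq_getElem?_getD, List.getElem?_replicate] at hv
      split_ifs at hv <;> simp at hv
    · intro v hv
      simp at hv
  | succ j ihj =>
    intro hle
    have hj : j < arr.length := by omega
    have hstep := invS_step arr target ht j hj _ (ihj (by omega))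
    have hA : stA arr target (j + 1) = stepA arr target (stA arr target j) j := by
      unfold stA
      rw [List.range_succ, List.foldl_append, List.foldl_cons, List.foldl_nil]
    rw [hA]
    exact hstep

lemma nopair_case (arr : List Int) (target : Int) (ht : 1 ≤ target)
    (hnop : ¬ HasPair arr target) :
    minSumOfLengths arr target = minSumOfLengths_alt arr target := by
  have hBmin := bestB_isMin arr target
  have hinv := invS_all arr target ht arr.length le_rfl
  have hA : minSumOfLengths arr target =
      (match (stA arr target arr.length).2.2.2 with | some r => r | none => -1) := rfl
  have hB : minSumOfLengths_alt arr target =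
      (match ((winsB arr target).foldl (fun best w1 =>
        (winsB arr target).foldl (fun best w2 =>
          if w1.2 < w2.1 then
            updMin best (((w1.2 : Int) - (w1.1 : Int) + 1) + ((w2.2 : Int) - (w2.1 : Int) + 1))
          else best) best) (none : Option Int)) with
        | some b => b | none => -1) := rfl
  rw [hA, hB]
  rcases hSA : stA arr target arr.length with ⟨t, i, dp, ret⟩
  rw [hSA] at hinv
  have hretnone : ret = none := by
    cases hr : ret with
    | none => rfl
    | some v =>
      obtain ⟨w, hw⟩ := hinv.2.2.2.2.2 v hr
      exact absurd (PairT_hasPair arr target w hw) hnop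
  have hbnone : ((winsB arr target).foldl (fun best w1 =>
      (winsB arr target).foldl (fun best w2 =>
        if w1.2 < w2.1 then
          updMin best (((w1.2 : Int) - (w1.1 : Int) + 1) + ((w2.2 : Int) - (w2.1 : Int) + 1))
        else best) best) (none : Option Int)) = none := by
    cases hb : ((winsB arr target).foldl (fun best w1 =>
      (winsB arr target).foldl (fun best w2 =>
        if w1.2 < w2.1 then
          updMin best (((w1.2 : Int) - (w1.1 : Int) + 1) + ((w2.2 : Int) - (w2.1 : Int) + 1))
        else best) best) (none : Option Int)) with
    | none => rfl
    | some m =>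
      exact absurd (PairT_hasPair arr target m (hBmin.2 m hb)) hnop
  rw [hretnone, hbnone]

-- ===== VERDICT (by name: the statement is the Claim_ definition above) =====
theorem minSumOfLengths_spec : Claim_equal_minSumOfLengths := by
  intro arr target _hdom hpre
  unfold Spec_minSumOfLengths
  rcases hpre with rfl | ⟨ht, hpos | hnop⟩
  · rfl
  case inr.inr => exact nopair_case arr target ht hnop
  · have hinv := inv_all arr target ht hpos arr.length le_rfl
    have hBmin := bestB_isMin arr target
    have hA : minSumOfLengths arr target =
        (match (stA arr target arr.length).2.2.2 with | some r => r | none => -1) := rfl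
    have hB : minSumOfLengths_alt arr target =
        (match ((winsB arr target).foldl (fun best w1 =>
          (winsB arr target).foldl (fun best w2 =>
            if w1.2 < w2.1 then
              updMin best (((w1.2 : Int) - (w1.1 : Int) + 1) + ((w2.2 : Int) - (w2.1 : Int) + 1))
            else best) best) (none : Option Int)) with
          | some b => b | none => -1) := rfl
    rw [hA, hB]
    rcases hSA : stA arr target arr.length with ⟨t, i, dp, ret⟩
    rw [hSA] at hinv
    have hAmin : IsMinOpt (PairT arr target arr.length) ret := hinv.2.2.2.2.2.2
    rw [IsMinOpt_unique hAmin hBmin]
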